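-- pv_equiv track=rewrite | github.com/ashinzekene/bioinformatics | genome-sequencing/week_4/spectrum_convolution.py | SpectrumConvolution
-- ===== SOURCE A (Python) =====
-- def SpectrumConvolution(spectrum):
--     spectrum.sort()
--     convolution = []
--     for i, current_mass in enumerate(spectrum[:-1]):
--         for mass in spectrum[i+1:]:
--             if mass == current_mass:
--                 continue
--             convolution.append(mass - current_mass)
--     convolution.sort()
--     return convolution
-- ===== SOURCE B (Python) =====
-- def SpectrumConvolution(spectrum):
--     spectrum.sort()
--     diffs = []
--     pos = 0
--     n = len(spectrum)
--     while pos < n: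
--         v = spectrum[pos]
--         run = pos
--         while run < n and spectrum[run] == v:
--             run += 1
--         diffs += [m - v for m in spectrum[run:]] * (run - pos)
--         pos = run
--     diffs.sort()
--     return diffs
-- ===== Notes on version B (the rewrite author's own statement) =====
-- stated objective: alternative
-- what changed: Instead of scanning every index pair with an equality-skip test, B decomposes the sorted list into runs of equal values, builds the difference block to the remaining suffix once per run and repeats it by the run length.
import Mathlib
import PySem

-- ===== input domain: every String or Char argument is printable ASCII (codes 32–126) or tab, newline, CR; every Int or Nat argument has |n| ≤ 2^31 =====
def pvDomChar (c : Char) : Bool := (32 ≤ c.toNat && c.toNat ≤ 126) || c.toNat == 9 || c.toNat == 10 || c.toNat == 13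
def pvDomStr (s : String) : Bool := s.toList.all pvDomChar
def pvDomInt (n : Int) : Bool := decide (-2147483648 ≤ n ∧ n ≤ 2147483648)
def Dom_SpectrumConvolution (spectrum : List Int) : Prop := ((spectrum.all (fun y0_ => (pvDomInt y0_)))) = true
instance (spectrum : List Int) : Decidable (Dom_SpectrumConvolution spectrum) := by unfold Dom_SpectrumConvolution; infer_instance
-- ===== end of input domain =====

-- B replaces A's scan over all index pairs by a run-length decomposition of the sorted list:
-- one difference block per run of equal values, repeated by the run's length.
-- A sorts its argument in place; B performs the same mutation; the theorem is about the return value.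

-- ===== PORT A =====
def SpectrumConvolution (spectrum : List Int) : List Int :=
  let s := PySem.List.sorted spectrum (fun x => x) false
  let conv : List Int :=
    (PySem.List.enumerate (PySem.List.slice s none (some (-1)))).foldl
      (fun acc p =>
        (PySem.List.slice s (some (p.1 + 1)) none).foldl
          (fun acc2 mass => if mass == p.2 then acc2 else acc2 ++ [mass - p.2]) acc)
      []
  PySem.List.sorted conv (fun x => x) false

-- ===== PORT B =====
-- port of B's outer 'while pos < n' / inner 'while run < n and spectrum[run] == v' loop:
-- the two index pointers are ported as the suffix list spectrum[pos:], on which the inner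
-- scan counting the leading run of v is takeWhile/dropWhile (exact: s[pos], s[run:] are
-- determined by the suffix); 'block * (run - pos)' is pyRepeat.
def pvConvRuns : List Int → List Int
  | [] => []
  | v :: u =>
      PySem.List.pyRepeat ((u.dropWhile (fun m => m == v)).map (fun m => m - v))
        (1 + ((u.takeWhile (fun m => m == v)).length : Int))
      ++ pvConvRuns (u.dropWhile (fun m => m == v))
termination_by l => l.length
decreasing_by
  have := List.length_dropWhile_le (fun m => m == v) u
  simp; omega

def SpectrumConvolution_alt (spectrum : List Int) : List Int :=
  let s := PySem.List.sorted spectrum (fun x => x) false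
  let diffs := pvConvRuns s
  PySem.List.sorted diffs (fun x => x) false

-- ===== PRECONDITION & SPEC =====
def Spec_SpectrumConvolution (spectrum : List Int) (out : List Int) : Prop := out = SpectrumConvolution_alt spectrum
instance (spectrum : List Int) (out : List Int) : Decidable (Spec_SpectrumConvolution spectrum out) := by unfold Spec_SpectrumConvolution; infer_instance

-- ===== CLAIM (what is proved, stated in full; the proofs are below) =====
def Claim_equal_SpectrumConvolution : Prop := ∀ (spectrum : List Int), Dom_SpectrumConvolution spectrum → Spec_SpectrumConvolution spectrum (SpectrumConvolution spectrum)

-- ===== LEMMAS AND PROOFS =====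

-- proof-side characterisation of A's nested loop on the sorted input
def convRec : List Int → List Int
  | [] => []
  | x :: t => (t.filter (fun y => y != x)).map (fun y => y - x) ++ convRec t

theorem aux_shift (x : Int) (u l : List Int) (s : Int) (hs : 0 ≤ s) :
    (PySem.List.enumerate l (s+1)).flatMap
      (fun p => ((PySem.List.slice (x :: u) (some (p.1 + 1)) none).filter (fun y => y != p.2)).map (fun y => y - p.2))
    = (PySem.List.enumerate l s).flatMap
      (fun p => ((PySem.List.slice u (some (p.1 + 1)) none).filter (fun y => y != p.2)).map (fun y => y - p.2)) := by
  induction l generalizing s with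
  | nil => simp [PySem.List.enumerate_nil]
  | cons z l' ih =>
    rw [PySem.List.enumerate_cons, PySem.List.enumerate_cons, List.flatMap_cons, List.flatMap_cons]
    rw [ih (s+1) (by omega)]
    congr 1
    rw [PySem.List.slice_from _ (by omega : (0:Int) ≤ s + 1 + 1), PySem.List.slice_from _ (by omega : (0:Int) ≤ s + 1)]
    have h3 : (s + 1 + 1).toNat = (s + 1).toNat + 1 := by omega
    rw [h3, List.drop_succ_cons]

theorem flatMap_main (s : List Int) :
    (PySem.List.enumerate s.dropLast 0).flatMap
      (fun p => ((PySem.List.slice s (some (p.1 + 1)) none).filter (fun y => y != p.2)).map (fun y => y - p.2))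
    = convRec s := by
  induction s with
  | nil => simp [PySem.List.enumerate_nil, convRec]
  | cons x t ih =>
    match t with
    | [] => simp [PySem.List.enumerate_nil, convRec]
    | y :: t' =>
      rw [List.dropLast_cons₂, PySem.List.enumerate_cons, List.flatMap_cons]
      rw [show (0:Int) + 1 = 0 + 1 from rfl, aux_shift x (y :: t') _ 0 le_rfl, ih]
      rw [PySem.List.slice_from _ (by norm_num : (0:Int) ≤ ((0,x) : Int × Int).1 + 1)]
      simp [convRec]

theorem convA_eq_convRec (s : List Int) :
    (PySem.List.enumerate (PySem.List.slice s none (some (-1)))).foldl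
      (fun acc p =>
        (PySem.List.slice s (some (p.1 + 1)) none).foldl
          (fun acc2 mass => if mass == p.2 then acc2 else acc2 ++ [mass - p.2]) acc)
      [] = convRec s := by
  rw [PySem.List.slice_to_neg_one]
  have hb : (fun (acc : List Int) (p : Int × Int) =>
        (PySem.List.slice s (some (p.1 + 1)) none).foldl
          (fun acc2 mass => if mass == p.2 then acc2 else acc2 ++ [mass - p.2]) acc)
      = (fun acc p => acc ++ ((PySem.List.slice s (some (p.1 + 1)) none).filter (fun y => y != p.2)).map (fun y => y - p.2)) := by
    funext acc p
    rw [show (fun (acc2 : List Int) mass => if mass == p.2 then acc2 else acc2 ++ [mass - p.2])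
          = (fun (acc2 : List Int) mass => if mass != p.2 then acc2 ++ [mass - p.2] else acc2) from
        funext fun a => funext fun m => by by_cases h : m = p.2 <;> simp [h]]
    exact PySem.List.foldl_append_if _ _ _ _
  rw [hb, PySem.List.foldl_append_eq_flatMap, List.nil_append, flatMap_main]

theorem pyRepeat_eq_flatten_replicate {α : Type} (xs : List α) (k : Nat) :
    PySem.List.pyRepeat xs (k : Int) = (List.replicate k xs).flatten := by
  simp [PySem.List.pyRepeat]

theorem convRec_run (v : Int) : ∀ (j : Nat) (rest : List Int), (∀ m ∈ rest, m ≠ v) →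
    convRec (v :: (List.replicate j v ++ rest))
      = (List.replicate (j+1) (rest.map (fun m => m - v))).flatten ++ convRec rest := by
  intro j
  induction j with
  | zero =>
    intro rest hr
    rw [convRec]
    simp only [List.replicate_zero, List.nil_append]
    rw [List.filter_eq_self.mpr (fun m hm => by simpa using hr m hm)]
    simp
  | succ j ih =>
    intro rest hr
    have hcons : List.replicate (j+1) v ++ rest = v :: (List.replicate j v ++ rest) := by
      rw [List.replicate_succ, List.cons_append]
    rw [convRec, hcons, ih rest hr]
    rw [List.filter_cons_of_neg (by simp)]
    have hfilter : (List.replicate j v ++ rest).filter (fun y => y != v) = rest := by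
      rw [List.filter_append,
        show (List.replicate j v).filter (fun y => y != v) = [] from by simp,
        List.filter_eq_self.mpr (fun m hm => by simpa using hr m hm), List.nil_append]
    rw [hfilter]
    simp [List.replicate_succ, List.append_assoc]

theorem runs_eq_aux : ∀ (N : Nat) (s : List Int), s.length ≤ N → s.Pairwise (· ≤ ·) →
    pvConvRuns s = convRec s := by
  intro N
  induction N with
  | zero =>
    intro s hl _
    have h0 : s = [] := List.length_eq_zero_iff.mp (Nat.le_zero.mp hl)
    subst h0; rw [pvConvRuns, convRec]
  | succ N ih =>
    intro s hl hs
    match s with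
    | [] => rw [pvConvRuns, convRec]
    | v :: u =>
      have ht : u.Pairwise (· ≤ ·) := List.Pairwise.of_cons hs
      have hvle : ∀ y ∈ u, v ≤ y := fun y hy => List.rel_of_pairwise_cons hs hy
      have hw : u.takeWhile (fun m => m == v) = List.replicate (u.takeWhile (fun m => m == v)).length v := by
        apply List.eq_replicate_of_mem
        intro m hm
        have := List.mem_takeWhile_imp hm
        simpa using this
      have hrest_pw : (u.dropWhile (fun m => m == v)).Pairwise (· ≤ ·) :=
        List.Pairwise.sublist ((List.dropWhile_suffix _).sublist) ht
      have hrne : ∀ m ∈ u.dropWhile (fun m => m == v), m ≠ v := by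
        intro m hm
        match hrest : u.dropWhile (fun m => m == v) with
        | [] => rw [hrest] at hm; cases hm
        | h :: r =>
          have hhne : ¬(h == v) = true := by
            have := List.head?_dropWhile_not (fun m => m == v) u
            rw [hrest] at this
            simpa using this
          have hhv : v < h := by
            have hhm : h ∈ u := (List.dropWhile_suffix (fun m => m == v)).subset (hrest ▸ List.mem_cons_self)
            have := hvle h hhm
            simp at hhne
            omega
          rw [hrest] at hm
          rcases List.mem_cons.mp hm with rfl | hmr
          · omega
          · have : h ≤ m := List.rel_of_pairwise_cons (hrest ▸ hrest_pw) hmr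
            omega
      have hu : u = List.replicate (u.takeWhile (fun m => m == v)).length v ++ u.dropWhile (fun m => m == v) := by
        conv_lhs => rw [← List.takeWhile_append_dropWhile (p := fun m => m == v) (l := u)]
        rw [← hw]
      have hlen : (u.dropWhile (fun m => m == v)).length ≤ N := by
        have := List.length_dropWhile_le (fun m => m == v) u
        simp at hl; omega
      rw [pvConvRuns, ih _ hlen hrest_pw]
      rw [show (1 : Int) + ((u.takeWhile (fun m => m == v)).length : Int)
            = (((u.takeWhile (fun m => m == v)).length + 1 : Nat) : Int) from by push_cast; ring]
      rw [pyRepeat_eq_flatten_replicate]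
      conv_rhs => rw [show v :: u = v :: u from rfl]
      conv_rhs => rw [hu]
      rw [convRec_run v _ _ hrne]

-- ===== VERDICT (by name: the statement is the Claim_ definition above) =====
theorem SpectrumConvolution_spec : Claim_equal_SpectrumConvolution := by
  intro spectrum _
  unfold Spec_SpectrumConvolution SpectrumConvolution SpectrumConvolution_alt
  dsimp only
  rw [convA_eq_convRec,
    runs_eq_aux (PySem.List.sorted spectrum (fun x => x) false).length _ le_rfl
      (PySem.List.sorted_pairwise ..)]
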